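-- pv_equiv track=rewrite | github.com/dmhysht/advent_of_code_2021 | day3/a-o-c-2021-day-3.py | __get_co2_scrubbing_rating
-- ===== SOURCE A (Python) =====
-- from collections import defaultdict
--
-- def __get_co2_scrubbing_rating(binary_list, bit_pos):
--     if len(binary_list) == 1:
--         return int(binary_list[0], 2)
--     binary_dict = defaultdict(list)
--     for binary in binary_list:
--         binary_dict[binary[bit_pos]].append(binary)
--     if len(binary_dict['0']) <= len(binary_dict['1']):
--         return __get_co2_scrubbing_rating(binary_dict['0'], bit_pos + 1)
--     else:
--         return __get_co2_scrubbing_rating(binary_dict['1'], bit_pos + 1)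
-- ===== SOURCE B (Python) =====
-- def __get_co2_scrubbing_rating(binary_list, bit_pos):
--     # Iterative reformulation: a while-loop keeps filtering the candidate list
--     # by the bit at bit_pos (least-common group, ties -> '0' group), exactly as
--     # A's recursion does, until one candidate remains.
--     while len(binary_list) != 1:
--         zeros, ones = [], []
--         for binary in binary_list:
--             c = binary[bit_pos]
--             if c == '0':
--                 zeros.append(binary)
--             elif c == '1':
--                 ones.append(binary)
--         binary_list = zeros if len(zeros) <= len(ones) else ones
--         bit_pos += 1
--     return int(binary_list[0], 2)
-- ===== Notes on version B (the rewrite author's own statement) =====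
-- stated objective: alternative
-- what changed: A's recursion is rewritten as an explicit while-loop that re-binds (binary_list, bit_pos), and the defaultdict grouping is replaced by two plain partition lists per pass; tie-break (<=) and per-level partitioning are unchanged. Pre_ excludes only inputs where A raises (IndexError/ValueError/RecursionError); every input A returns on is admitted.
import Mathlib
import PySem

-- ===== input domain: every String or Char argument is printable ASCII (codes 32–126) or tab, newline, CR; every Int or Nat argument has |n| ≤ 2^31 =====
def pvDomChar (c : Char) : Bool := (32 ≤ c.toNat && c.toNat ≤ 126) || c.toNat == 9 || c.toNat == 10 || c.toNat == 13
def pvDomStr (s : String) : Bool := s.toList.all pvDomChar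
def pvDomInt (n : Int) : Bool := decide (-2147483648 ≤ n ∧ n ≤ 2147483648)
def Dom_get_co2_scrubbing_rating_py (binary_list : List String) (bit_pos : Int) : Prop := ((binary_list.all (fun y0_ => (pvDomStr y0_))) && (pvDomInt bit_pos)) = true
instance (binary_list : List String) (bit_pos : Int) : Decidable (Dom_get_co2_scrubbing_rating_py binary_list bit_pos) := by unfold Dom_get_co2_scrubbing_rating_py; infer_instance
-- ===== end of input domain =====

-- B replaces A's recursion by an explicit while-loop over the same per-level
-- partition (objective: alternative decomposition, same cost).


-- ===== PORT A =====
-- 'for binary in binary_list: binary_dict[binary[bit_pos]].append(binary)'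
-- as a fold over an Option-wrapped dict (none = IndexError from binary[bit_pos]).
def co2ADict (binary_list : List String) (bit_pos : Int) :
    Option (PySem.Dict Char (List String)) :=
  binary_list.foldl
    (fun acc binary => acc.bind (fun d =>
      (PySem.Str.pyGet? binary bit_pos).map
        (fun c => d.modify c [] (· ++ [binary]))))
    (some PySem.Dict.empty)

-- A's recursion (none = a Python exception: IndexError or ValueError from
-- int(_, 2)).  A diverges with RecursionError exactly when a recursive call
-- fails to shrink the list, so fuel binary_list.length + 1 runs out only on
-- inputs where Python never returns: the fuel guard only makes the same
-- computation total.
def co2A (fuel : Nat) (binary_list : List String) (bit_pos : Int) : Option Int :=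
  match fuel with
  | 0 => none
  | f + 1 =>
    if binary_list.length = 1 then
      (PySem.List.pyGet? binary_list 0).bind (fun s => PySem.Int.ofStrBase? s 2)
    else
      (co2ADict binary_list bit_pos).bind (fun d =>
        if (d.getD '0' []).length ≤ (d.getD '1' []).length then
          co2A f (d.getD '0' []) (bit_pos + 1)
        else
          co2A f (d.getD '1' []) (bit_pos + 1))

def get_co2_scrubbing_rating_py (binary_list : List String) (bit_pos : Int) : Int :=
  (co2A (binary_list.length + 1) binary_list bit_pos).getD 0

-- ===== PORT B =====
-- Source B's loop body: partition into the two lists zeros/ones directly.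
def co2BPartition (binary_list : List String) (bit_pos : Int) :
    Option (List String × List String) :=
  binary_list.foldl
    (fun acc binary => acc.bind (fun p =>
      (PySem.Str.pyGet? binary bit_pos).map
        (fun c => if c = '0' then (p.1 ++ [binary], p.2)
                  else if c = '1' then (p.1, p.2 ++ [binary]) else p)))
    (some ([], []))

-- Source B's while-loop as a fuel-guarded state machine on (binary_list, bit_pos).
def co2BLoop (fuel : Nat) (binary_list : List String) (bit_pos : Int) :
    Option (List String) :=
  match fuel with
  | 0 => none
  | f + 1 =>
    if binary_list.length = 1 then some binary_list
    else
      (co2BPartition binary_list bit_pos).bind (fun p =>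
        co2BLoop f (if p.1.length ≤ p.2.length then p.1 else p.2) (bit_pos + 1))

def get_co2_scrubbing_rating_py_alt (binary_list : List String) (bit_pos : Int) : Int :=
  ((co2BLoop (binary_list.length + 1) binary_list bit_pos).bind
    (fun l => (PySem.List.pyGet? l 0).bind (fun s => PySem.Int.ofStrBase? s 2))).getD 0

-- ===== PRECONDITION & SPEC =====
-- Pre_ holds on EXACTLY the inputs where the Python A returns normally, and on
-- no input where it raises, stated as a closed-form condition on the input: there
-- is a path of at most log2 n selection bits m such that, at every level j along
-- it, the strings agreeing with the path's first j bits (at positions bit_pos,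
-- bit_pos+1, …) number ≠ 1, are all long enough for the bit index (else A's
-- binary[bit_pos] is an IndexError), include both a '0' and a '1' at the level's
-- position (otherwise A recurses on an empty list until RecursionError), and the
-- path bit picks the smaller group ('0' on ties); after the last level exactly
-- one string agrees with the path, and it parses in base 2 (else ValueError).
-- No input on which A returns is excluded.

-- the strings of L that carry the path bits of m at positions p, p+1, …, p+k-1
def pvSurvivors (L : List String) (p : Int) (m k : Nat) : List String :=
  L.filter (fun s => (List.range k).all
    (fun j => PySem.Str.pyGet? s (p + (j : Int)) == some (if m.testBit j then '1' else '0')))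

def pvLevelOk (L : List String) (p : Int) (m j : Nat) : Bool :=
  let S := pvSurvivors L p m j
  (S.length != 1) &&
  S.all (fun s => (PySem.Str.pyGet? s (p + (j : Int))).isSome) &&
  (let z := (S.filter (fun s => PySem.Str.pyGet? s (p + (j : Int)) == some '0')).length
   let o := (S.filter (fun s => PySem.Str.pyGet? s (p + (j : Int)) == some '1')).length
   (z != 0) && (o != 0) &&
   ((if m.testBit j then '1' else '0') == (if z ≤ o then '0' else '1')))

def Pre_get_co2_scrubbing_rating_py (binary_list : List String) (bit_pos : Int) : Prop :=
  ((List.range (Nat.log2 binary_list.length + 1)).any (fun k =>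
    (List.range (2 ^ k)).any (fun m =>
      (List.range k).all (fun j => pvLevelOk binary_list bit_pos m j) &&
      ((pvSurvivors binary_list bit_pos m k).length == 1) &&
      (PySem.Int.ofStrBase? ((pvSurvivors binary_list bit_pos m k).headD "") 2).isSome))) = true
instance (binary_list : List String) (bit_pos : Int) : Decidable (Pre_get_co2_scrubbing_rating_py binary_list bit_pos) := by
  unfold Pre_get_co2_scrubbing_rating_py; infer_instance

def pvWitness_get_co2_scrubbing_rating_py : List String × Int := (["10", "01"], 0)

def Spec_get_co2_scrubbing_rating_py (binary_list : List String) (bit_pos : Int) (out : Int) : Prop := out = get_co2_scrubbing_rating_py_alt binary_list bit_pos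
instance (binary_list : List String) (bit_pos : Int) (out : Int) : Decidable (Spec_get_co2_scrubbing_rating_py binary_list bit_pos out) := by unfold Spec_get_co2_scrubbing_rating_py; infer_instance

-- ===== CLAIM (what is proved, stated in full; the proofs are below) =====
def Claim_equal_get_co2_scrubbing_rating_py : Prop := ∀ (binary_list : List String) (bit_pos : Int), Dom_get_co2_scrubbing_rating_py binary_list bit_pos → Pre_get_co2_scrubbing_rating_py binary_list bit_pos → Spec_get_co2_scrubbing_rating_py binary_list bit_pos (get_co2_scrubbing_rating_py binary_list bit_pos)

-- ===== LEMMAS AND PROOFS =====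

-- A's dict-grouping fold and B's pair-of-lists fold build the same two groups.
lemma fold_dict_eq_pair (bl : List String) (bp : Int) :
    ∀ (d : PySem.Dict Char (List String)) (z o : List String),
      d.getD '0' [] = z → d.getD '1' [] = o →
    (bl.foldl
      (fun acc binary => acc.bind (fun d =>
        (PySem.Str.pyGet? binary bp).map
          (fun c => d.modify c [] (· ++ [binary]))))
      (some d)).map (fun d => (d.getD '0' [], d.getD '1' [])) =
    bl.foldl
      (fun acc binary => acc.bind (fun p =>
        (PySem.Str.pyGet? binary bp).map
          (fun c => if c = '0' then (p.1 ++ [binary], p.2)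
                    else if c = '1' then (p.1, p.2 ++ [binary]) else p)))
      (some (z, o)) := by
  induction bl with
  | nil => intro d z o hz ho; simp [hz, ho]
  | cons b bl ih =>
    intro d z o hz ho
    simp only [List.foldl_cons, Option.bind_some]
    cases hc : PySem.Str.pyGet? b bp with
    | none =>
      simp only [Option.map_none]
      have h1 : ∀ (l : List String),
          l.foldl (fun (acc : Option (PySem.Dict Char (List String))) binary =>
            acc.bind (fun d => (PySem.Str.pyGet? binary bp).map
              (fun c => d.modify c [] (· ++ [binary])))) none = none := by
        intro l; induction l with
        | nil => rfl
        | cons x xs ihx => simpa using ihx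
      have h2 : ∀ (l : List String),
          l.foldl (fun (acc : Option (List String × List String)) binary =>
            acc.bind (fun p => (PySem.Str.pyGet? binary bp).map
              (fun c => if c = '0' then (p.1 ++ [binary], p.2)
                        else if c = '1' then (p.1, p.2 ++ [binary]) else p))) none = none := by
        intro l; induction l with
        | nil => rfl
        | cons x xs ihx => simpa using ihx
      rw [h1, h2]; rfl
    | some c =>
      simp only [Option.map_some]
      by_cases h0 : c = '0'
      · subst h0
        refine ih _ _ _ ?_ ?_
        · rw [PySem.Dict.getD_modify_self, hz]
        · rw [PySem.Dict.getD_modify_of_ne _ _ _ (by decide), ho]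
      · by_cases hc1 : c = '1'
        · subst hc1
          simp only [if_neg h0] at *
          refine ih _ _ _ ?_ ?_
          · rw [PySem.Dict.getD_modify_of_ne _ _ _ (by decide), hz]
          · rw [PySem.Dict.getD_modify_self, ho]
        · simp only [if_neg h0, if_neg hc1]
          refine ih _ _ _ ?_ ?_
          · rw [PySem.Dict.getD_modify_of_ne _ _ _ (Ne.symm h0), hz]
          · rw [PySem.Dict.getD_modify_of_ne _ _ _ (Ne.symm hc1), ho]

lemma dict_eq_partition (bl : List String) (bp : Int) :
    (co2ADict bl bp).map (fun d => (d.getD '0' [], d.getD '1' [])) =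
      co2BPartition bl bp := by
  unfold co2ADict co2BPartition
  exact fold_dict_eq_pair bl bp PySem.Dict.empty [] [] (by simp [pysem]) (by simp [pysem])

-- With the same fuel, A's recursion computes exactly B's loop followed by the
-- final int(binary_list[0], 2).
lemma co2A_eq_co2B (fuel : Nat) : ∀ (bl : List String) (bp : Int),
    co2A fuel bl bp =
      (co2BLoop fuel bl bp).bind
        (fun l => (PySem.List.pyGet? l 0).bind (fun s => PySem.Int.ofStrBase? s 2)) := by
  induction fuel with
  | zero => intro bl bp; simp [co2A, co2BLoop]
  | succ f ih =>
    intro bl bp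
    rw [co2A, co2BLoop]
    by_cases h1 : bl.length = 1
    · simp [h1]
    · simp only [if_neg h1]
      have hfold := dict_eq_partition bl bp
      cases hA : co2ADict bl bp with
      | none =>
        rw [hA] at hfold
        simp only [Option.map_none] at hfold
        simp [← hfold]
      | some d =>
        rw [hA] at hfold
        simp only [Option.map_some] at hfold
        rw [← hfold]
        by_cases hle : (d.getD '0' []).length ≤ (d.getD '1' []).length
        · simp [hle, ih]
        · simp [hle, ih]

-- ===== VERDICT (by name: the statement is the Claim_ definition above) =====
theorem get_co2_scrubbing_rating_py_spec : Claim_equal_get_co2_scrubbing_rating_py := by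
  intro bl bp _ _
  unfold Spec_get_co2_scrubbing_rating_py get_co2_scrubbing_rating_py get_co2_scrubbing_rating_py_alt
  rw [co2A_eq_co2B]
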